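-- pv_equiv track=rewrite | github.com/uz-gaz/Tertimuss | tertimuss/schedulers/alecs.py | __schedule_policy_imp
-- ===== SOURCE A (Python) =====
-- import heapq
-- from typing import List, Optional, Tuple, Dict, Set
--
-- def __schedule_policy_imp(tasks_being_executed: List[int], interval_cc_left: List[int],
--                           cycles_in_this_interval: int) -> List[int]:
--     """
--     Assign tasks to cores
--     :param tasks_being_executed: actual tasks in execution
--     :param interval_cc_left: CC left of each task in this interval
--     :param cycles_in_this_interval: Cycles left in this interval
--     :return: next tasks to execute
--     """
--     m = len(tasks_being_executed)
--
--     # Contains tasks that can be executed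
--     executable_tasks = [(i, j) for i, j in enumerate(interval_cc_left) if j > 0]
--
--     # Contains all zero laxity tasks
--     tasks_laxity_zero = [i for (i, j) in executable_tasks if j == cycles_in_this_interval]
--
--     # Update executable tasks
--     executable_tasks_middle_priority = [(i, j) for (i, j) in executable_tasks if j != cycles_in_this_interval]
--
--     # Select active tasks
--     active_tasks_to_execute = [i for (i, j) in executable_tasks_middle_priority if i in tasks_being_executed]
--
--     # Update executable tasks
--     executable_tasks_low_priority = [(i, j) for (i, j) in executable_tasks_middle_priority if
--                                      i not in active_tasks_to_execute]
--
--     if len(tasks_laxity_zero) + len(active_tasks_to_execute) < m: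
--         # Only in this case we will select tasks that wasn't being executed and dont have laxity zero
--         elements_to_obtain = m - (len(tasks_laxity_zero) + len(active_tasks_to_execute))
--         low_priority_tasks = heapq.nlargest(min(elements_to_obtain, len(executable_tasks_low_priority)),
--                                             executable_tasks_low_priority,
--                                             key=lambda i: i[1])
--     else:
--         low_priority_tasks = []
--
--     # Tasks with laxity zero, active tasks, rest of the tasks, idle tasks
--     tasks_to_execute = (tasks_laxity_zero + active_tasks_to_execute + [i for (i, j) in low_priority_tasks] + (
--             m * [-1]))[:m]
--
--     # Do affinity, this is a little improvement over the original algorithm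
--     for i in range(m):
--         actual = tasks_being_executed[i]
--         for j in range(m):
--             if tasks_to_execute[j] == actual and j != i:
--                 tasks_to_execute[j], tasks_to_execute[i] = tasks_to_execute[i], tasks_to_execute[j]
--
--     return tasks_to_execute
-- ===== SOURCE B (Python) =====
-- def __schedule_policy_imp(tasks_being_executed, interval_cc_left, cycles_in_this_interval):
--     m = len(tasks_being_executed)
--     running = set(tasks_being_executed)
--
--     # Rank every executable task with one composite key and sort ONCE:
--     # (0, index) zero laxity, (1, index) currently running, (2, -cc_left) the rest.
--     def rank(p):
--         i, j = p
--         if j == cycles_in_this_interval: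
--             return (0, i)
--         if i in running:
--             return (1, i)
--         return (2, -j)
--
--     ready = sorted(((i, j) for i, j in enumerate(interval_cc_left) if j > 0), key=rank)
--     tasks_to_execute = [i for i, _ in ready[:m]]
--     tasks_to_execute += [-1] * (m - len(tasks_to_execute))
--
--     # Affinity: give core i its previous task back by locating it with index().
--     for i, actual in enumerate(tasks_being_executed):
--         try:
--             j = tasks_to_execute.index(actual)
--             if j == i:
--                 j = tasks_to_execute.index(actual, i + 1)
--         except ValueError:
--             continue
--         tasks_to_execute[i], tasks_to_execute[j] = tasks_to_execute[j], tasks_to_execute[i]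
--     return tasks_to_execute
-- ===== Notes on version B (the rewrite author's own statement) =====
-- stated objective: faster
-- what changed: The staged selection (four filtering comprehensions with O(m) list-membership tests inside, a heapq.nlargest fill of the free cores, then append m sentinels and truncate) is replaced by ONE stable sort of all executable tasks under a composite rank key ((0,i) zero laxity, (1,i) running, (2,-cc_left) rest) against a prebuilt set, truncated to m and padded; the affinity pass locates each previous task with list.index() instead of scanning all m cores with repeated no-op swaps.
import Mathlib
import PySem

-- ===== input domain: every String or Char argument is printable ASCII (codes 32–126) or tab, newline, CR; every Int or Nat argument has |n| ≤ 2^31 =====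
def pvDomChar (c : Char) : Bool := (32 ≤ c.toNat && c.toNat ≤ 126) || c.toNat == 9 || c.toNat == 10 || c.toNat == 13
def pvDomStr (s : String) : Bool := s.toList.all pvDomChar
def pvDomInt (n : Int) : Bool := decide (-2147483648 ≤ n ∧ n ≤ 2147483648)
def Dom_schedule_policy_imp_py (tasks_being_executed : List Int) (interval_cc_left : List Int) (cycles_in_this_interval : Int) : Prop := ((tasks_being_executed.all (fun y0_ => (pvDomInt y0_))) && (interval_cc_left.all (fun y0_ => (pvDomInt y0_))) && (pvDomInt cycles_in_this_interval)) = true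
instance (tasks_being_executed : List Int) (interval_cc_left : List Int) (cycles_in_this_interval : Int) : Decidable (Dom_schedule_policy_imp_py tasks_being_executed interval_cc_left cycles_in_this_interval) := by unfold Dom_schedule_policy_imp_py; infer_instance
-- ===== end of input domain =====

-- B replaces A's staged pipeline (four filtering comprehensions with list-membership tests
-- inside + heapq.nlargest fill + sentinel-pad-and-truncate + a nested swap scan) by ONE
-- composite-key sort of all executable tasks against a prebuilt set, then an affinity pass
-- that locates each previous task with list.index() (objective: faster, as measured by the
-- timing run; same return value, no observable side effects).

-- ===== PORT A =====
-- A's inner affinity step: 'if tasks_to_execute[j] == actual and j != i: swap'.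
-- Indices i, j come from range(m) and the list has length m, so they are always in
-- range: Nat indices with List.getD/List.set are exact here.
def pvSwapStepA (i : Nat) (actual : Int) (t : List Int) (j : Nat) : List Int :=
  if t.getD j 0 = actual ∧ j ≠ i then (t.set j (t.getD i 0)).set i (t.getD j 0) else t

def schedule_policy_imp_py (tasks_being_executed : List Int) (interval_cc_left : List Int) (cycles_in_this_interval : Int) : List Int :=
  let m := tasks_being_executed.length
  let executable_tasks := (PySem.List.enumerate interval_cc_left 0).filter (fun p => decide (0 < p.2))
  let tasks_laxity_zero := (executable_tasks.filter (fun p => decide (p.2 = cycles_in_this_interval))).map (fun p => p.1)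
  let executable_tasks_middle_priority := executable_tasks.filter (fun p => decide (¬ p.2 = cycles_in_this_interval))
  let active_tasks_to_execute := (executable_tasks_middle_priority.filter (fun p => decide (p.1 ∈ tasks_being_executed))).map (fun p => p.1)
  let executable_tasks_low_priority := executable_tasks_middle_priority.filter (fun p => decide (¬ p.1 ∈ active_tasks_to_execute))
  let low_priority_tasks :=
    if tasks_laxity_zero.length + active_tasks_to_execute.length < m then
      -- heapq.nlargest(n, xs, key=k) is documented equivalent to sorted(xs, key=k, reverse=True)[:n]
      (PySem.List.sorted executable_tasks_low_priority (fun p => p.2) true).take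
        (min (m - (tasks_laxity_zero.length + active_tasks_to_execute.length)) executable_tasks_low_priority.length)
    else []
  let tasks_to_execute :=
    (tasks_laxity_zero ++ active_tasks_to_execute ++ low_priority_tasks.map (fun p : Int × Int => p.1) ++ List.replicate m (-1)).take m
  (List.range m).foldl
    (fun t i => (List.range m).foldl (pvSwapStepA i (tasks_being_executed.getD i 0)) t)
    tasks_to_execute

-- ===== PORT B =====
-- B's affinity step for core i holding value `actual`:
-- j = t.index(actual); if j == i: j = t.index(actual, i+1)  — a raise of either index()
-- is caught by `except: continue`, so it is `none => t` here; `t.index(actual, i+1)` is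
-- ported exactly as index? on `t.drop (i+1)` shifted back by i+1.
def pvAffB (i : Nat) (actual : Int) (t : List Int) : List Int :=
  match PySem.List.index? t actual with
  | none => t
  | some j0 =>
    match (if j0 = i then (PySem.List.index? (t.drop (i+1)) actual).map (· + (i+1)) else some j0) with
    | none => t
    | some j => (t.set i (t.getD j 0)).set j (t.getD i 0)

def schedule_policy_imp_py_alt (tasks_being_executed : List Int) (interval_cc_left : List Int) (cycles_in_this_interval : Int) : List Int :=
  let m := tasks_being_executed.length
  let running := PySem.Set.ofList tasks_being_executed
  -- sorted(..., key=rank) with the tuple key rank(p) = (0,i) | (1,i) | (2,-j): sorted2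
  let ready := PySem.List.sorted2
    ((PySem.List.enumerate interval_cc_left 0).filter (fun p => decide (0 < p.2)))
    (fun p => if p.2 = cycles_in_this_interval then (0:Int) else if p.1 ∈ running then 1 else 2)
    (fun p => if p.2 = cycles_in_this_interval then p.1 else if p.1 ∈ running then p.1 else -p.2)
  let tasks0 := (ready.take m).map (fun p => p.1)
  let tasks_to_execute := tasks0 ++ List.replicate (m - tasks0.length) (-1)
  -- for i, actual in enumerate(tasks_being_executed): affinity via index()
  tasks_being_executed.zipIdx.foldl (fun t pa => pvAffB pa.2 pa.1 t) tasks_to_execute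

-- ===== PRECONDITION & SPEC =====
def Spec_schedule_policy_imp_py (tasks_being_executed : List Int) (interval_cc_left : List Int) (cycles_in_this_interval : Int) (out : List Int) : Prop := out = schedule_policy_imp_py_alt tasks_being_executed interval_cc_left cycles_in_this_interval
instance (tasks_being_executed : List Int) (interval_cc_left : List Int) (cycles_in_this_interval : Int) (out : List Int) : Decidable (Spec_schedule_policy_imp_py tasks_being_executed interval_cc_left cycles_in_this_interval out) := by unfold Spec_schedule_policy_imp_py; infer_instance

-- ===== CLAIM =====
def Claim_equal_schedule_policy_imp_py : Prop := ∀ (tasks_being_executed : List Int) (interval_cc_left : List Int) (cycles_in_this_interval : Int), Dom_schedule_policy_imp_py tasks_being_executed interval_cc_left cycles_in_this_interval → Spec_schedule_policy_imp_py tasks_being_executed interval_cc_left cycles_in_this_interval (schedule_policy_imp_py tasks_being_executed interval_cc_left cycles_in_this_interval)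

-- ===== LEMMAS AND PROOFS =====

-- ===== LEMMAS AND PROOFS =====

-- rank and secondary key of B's composite sort, with list membership in place of the set
def pvR (tbe : List Int) (cc : Int) (p : Int × Int) : Int :=
  if p.2 = cc then 0 else if p.1 ∈ tbe then 1 else 2
def pvK2 (tbe : List Int) (cc : Int) (p : Int × Int) : Int :=
  if p.2 = cc then p.1 else if p.1 ∈ tbe then p.1 else -p.2
def pvBef (tbe : List Int) (cc : Int) (a b : Int × Int) : Bool :=
  decide (pvR tbe cc a < pvR tbe cc b) ||
    (!decide (pvR tbe cc b < pvR tbe cc a) && decide (pvK2 tbe cc a < pvK2 tbe cc b))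
def pvBefRev (a b : Int × Int) : Bool := decide (b.2 < a.2)

lemma pv_k2_r0 (tbe : List Int) (cc : Int) (p : Int × Int) (h : pvR tbe cc p = 0) :
    pvK2 tbe cc p = p.1 := by
  unfold pvR at h; unfold pvK2; split_ifs at h ⊢ <;> simp_all
lemma pv_k2_r1 (tbe : List Int) (cc : Int) (p : Int × Int) (h : pvR tbe cc p = 1) :
    pvK2 tbe cc p = p.1 := by
  unfold pvR at h; unfold pvK2; split_ifs at h ⊢ <;> simp_all
lemma pv_k2_r2 (tbe : List Int) (cc : Int) (p : Int × Int) (h : pvR tbe cc p = 2) :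
    pvK2 tbe cc p = -p.2 := by
  unfold pvR at h; unfold pvK2; split_ifs at h ⊢ <;> simp_all
lemma pv_r_range (tbe : List Int) (cc : Int) (p : Int × Int) :
    pvR tbe cc p = 0 ∨ pvR tbe cc p = 1 ∨ pvR tbe cc p = 2 := by
  unfold pvR; split_ifs <;> simp

lemma pv_insertBy_none {α : Type} (bef : α → α → Bool) (x : α) :
    ∀ (ys zs : List α), (∀ y ∈ ys, bef x y = false) →
      PySem.List.insertBy bef x (ys ++ zs) = ys ++ PySem.List.insertBy bef x zs := by
  intro ys
  induction ys with
  | nil => intro zs _; rfl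
  | cons y rest ih =>
      intro zs h
      have hy : bef x y = false := h y (List.mem_cons_self ..)
      simp [PySem.List.insertBy, hy, ih zs (fun a ha => h a (List.mem_cons_of_mem _ ha))]

lemma pv_insertBy_true {α : Type} (bef : α → α → Bool) (x : α) (zs : List α)
    (h : ∀ z ∈ zs, bef x z = true) : PySem.List.insertBy bef x zs = x :: zs := by
  cases zs with
  | nil => rfl
  | cons z rest => simp [PySem.List.insertBy, h z (List.mem_cons_self ..)]

lemma pv_insertBy_congr {α : Type} (bef bef' : α → α → Bool) (x : α) :
    ∀ zs : List α, (∀ z ∈ zs, bef x z = bef' x z) →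
      PySem.List.insertBy bef x zs = PySem.List.insertBy bef' x zs := by
  intro zs
  induction zs with
  | nil => intro _; rfl
  | cons z rest ih =>
      intro h
      have hz := h z (List.mem_cons_self ..)
      by_cases hb : bef x z = true
      · simp [PySem.List.insertBy, hb, hz ▸ hb]
      · have hb' : bef x z = false := by simpa using hb
        simp [PySem.List.insertBy, hb', hz ▸ hb', ih (fun a ha => h a (List.mem_cons_of_mem _ ha))]

-- the stable composite-key insertion sort splits into the three rank segments
lemma pv_split (tbe : List Int) (cc : Int) :
    ∀ (e A0 A1 S2 : List (Int × Int)),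
      e.Pairwise (fun p q => p.1 < q.1) →
      (∀ q ∈ A0, pvR tbe cc q = 0) → (∀ q ∈ A1, pvR tbe cc q = 1) → (∀ q ∈ S2, pvR tbe cc q = 2) →
      (∀ p ∈ e, ∀ q ∈ A0, q.1 < p.1) → (∀ p ∈ e, ∀ q ∈ A1, q.1 < p.1) →
      e.foldl (fun acc x => PySem.List.insertBy (pvBef tbe cc) x acc) (A0 ++ A1 ++ S2) =
        (A0 ++ e.filter (fun p => decide (pvR tbe cc p = 0))) ++
        (A1 ++ e.filter (fun p => decide (pvR tbe cc p = 1))) ++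
        (e.filter (fun p => decide (pvR tbe cc p = 2))).foldl
          (fun acc x => PySem.List.insertBy pvBefRev x acc) S2 := by
  intro e
  induction e with
  | nil => intro A0 A1 S2 _ _ _ _ _ _; simp
  | cons x rest ih =>
      intro A0 A1 S2 hpw h0 h1 h2 hlt0 hlt1
      have hpw' : rest.Pairwise (fun p q => p.1 < q.1) := hpw.of_cons
      have hx : ∀ p ∈ rest, x.1 < p.1 := fun p hp => (List.pairwise_cons.mp hpw).1 p hp
      rw [List.foldl_cons]
      rcases pv_r_range tbe cc x with hr | hr | hr
      · -- rank 0: goes to the end of A0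
        have hstep : PySem.List.insertBy (pvBef tbe cc) x (A0 ++ A1 ++ S2) =
            (A0 ++ [x]) ++ A1 ++ S2 := by
          rw [List.append_assoc A0 A1 S2, pv_insertBy_none _ _ A0 (A1 ++ S2) ?hfalse,
            pv_insertBy_true _ _ (A1 ++ S2) ?htrue]
          · simp
          case hfalse =>
            intro y hy
            have hy0 := h0 y hy
            have hk2y := pv_k2_r0 tbe cc y hy0
            have hk2x := pv_k2_r0 tbe cc x hr
            have hlt := hlt0 x (List.mem_cons_self ..) y hy
            simp [pvBef, hr, hy0, hk2x, hk2y]; omega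
          case htrue =>
            intro z hz
            rcases List.mem_append.mp hz with hz | hz
            · have := h1 z hz; simp [pvBef, hr, this]
            · have := h2 z hz; simp [pvBef, hr, this]
        rw [hstep, ih (A0 ++ [x]) A1 S2 hpw'
          (by intro q hq; rcases List.mem_append.mp hq with h | h
              · exact h0 q h
              · simp at h; subst h; exact hr)
          h1 h2
          (by intro p hp q hq; rcases List.mem_append.mp hq with h | h
              · exact hlt0 p (List.mem_cons_of_mem _ hp) q h
              · simp at h; subst h; exact hx p hp)
          (fun p hp q hq => hlt1 p (List.mem_cons_of_mem _ hp) q hq)]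
        have hf0 : (x :: rest).filter (fun p => decide (pvR tbe cc p = 0)) =
            x :: rest.filter (fun p => decide (pvR tbe cc p = 0)) := by simp [hr]
        have hf1 : (x :: rest).filter (fun p => decide (pvR tbe cc p = 1)) =
            rest.filter (fun p => decide (pvR tbe cc p = 1)) := by simp [hr]
        have hf2 : (x :: rest).filter (fun p => decide (pvR tbe cc p = 2)) =
            rest.filter (fun p => decide (pvR tbe cc p = 2)) := by simp [hr]
        rw [hf0, hf1, hf2]; simp
      · -- rank 1: goes to the end of A1
        have hstep : PySem.List.insertBy (pvBef tbe cc) x (A0 ++ A1 ++ S2) =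
            A0 ++ (A1 ++ [x]) ++ S2 := by
          rw [pv_insertBy_none _ _ (A0 ++ A1) S2 ?hfalse, pv_insertBy_true _ _ S2 ?htrue]
          · simp
          case hfalse =>
            intro y hy
            rcases List.mem_append.mp hy with hy | hy
            · have := h0 y hy; simp [pvBef, hr, this]
            · have hy1 := h1 y hy
              have hk2y := pv_k2_r1 tbe cc y hy1
              have hk2x := pv_k2_r1 tbe cc x hr
              have hlt := hlt1 x (List.mem_cons_self ..) y hy
              simp [pvBef, hr, hy1, hk2x, hk2y]; omega
          case htrue =>
            intro z hz
            have := h2 z hz; simp [pvBef, hr, this]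
        rw [hstep, ih A0 (A1 ++ [x]) S2 hpw' h0
          (by intro q hq; rcases List.mem_append.mp hq with h | h
              · exact h1 q h
              · simp at h; subst h; exact hr)
          h2
          (fun p hp q hq => hlt0 p (List.mem_cons_of_mem _ hp) q hq)
          (by intro p hp q hq; rcases List.mem_append.mp hq with h | h
              · exact hlt1 p (List.mem_cons_of_mem _ hp) q h
              · simp at h; subst h; exact hx p hp)]
        have hf0 : (x :: rest).filter (fun p => decide (pvR tbe cc p = 0)) =
            rest.filter (fun p => decide (pvR tbe cc p = 0)) := by simp [hr]
        have hf1 : (x :: rest).filter (fun p => decide (pvR tbe cc p = 1)) =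
            x :: rest.filter (fun p => decide (pvR tbe cc p = 1)) := by simp [hr]
        have hf2 : (x :: rest).filter (fun p => decide (pvR tbe cc p = 2)) =
            rest.filter (fun p => decide (pvR tbe cc p = 2)) := by simp [hr]
        rw [hf0, hf1, hf2]; simp
      · -- rank 2: inserted into S2 exactly as the reverse sort by cc-left would
        have hstep : PySem.List.insertBy (pvBef tbe cc) x (A0 ++ A1 ++ S2) =
            A0 ++ A1 ++ PySem.List.insertBy pvBefRev x S2 := by
          rw [List.append_assoc, pv_insertBy_none _ _ A0 (A1 ++ S2) ?h0f,
            pv_insertBy_none _ _ A1 S2 ?h1f,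
            pv_insertBy_congr (pvBef tbe cc) pvBefRev x S2 ?hcg]
          · simp
          case h0f =>
            intro y hy; have := h0 y hy; simp [pvBef, hr, this]
          case h1f =>
            intro y hy; have := h1 y hy; simp [pvBef, hr, this]
          case hcg =>
            intro z hz
            have hz2 := h2 z hz
            have hk2z := pv_k2_r2 tbe cc z hz2
            have hk2x := pv_k2_r2 tbe cc x hr
            simp [pvBef, pvBefRev, hr, hz2, hk2x, hk2z]
        rw [hstep, ih A0 A1 (PySem.List.insertBy pvBefRev x S2) hpw' h0 h1
          (by intro q hq
              rcases (PySem.List.mem_insertBy _ _ _ _).mp hq with h | h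
              · subst h; exact hr
              · exact h2 q h)
          (fun p hp q hq => hlt0 p (List.mem_cons_of_mem _ hp) q hq)
          (fun p hp q hq => hlt1 p (List.mem_cons_of_mem _ hp) q hq)]
        have hf0 : (x :: rest).filter (fun p => decide (pvR tbe cc p = 0)) =
            rest.filter (fun p => decide (pvR tbe cc p = 0)) := by simp [hr]
        have hf1 : (x :: rest).filter (fun p => decide (pvR tbe cc p = 1)) =
            rest.filter (fun p => decide (pvR tbe cc p = 1)) := by simp [hr]
        have hf2 : (x :: rest).filter (fun p => decide (pvR tbe cc p = 2)) =
            x :: rest.filter (fun p => decide (pvR tbe cc p = 2)) := by simp [hr]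
        rw [hf0, hf1, hf2]; simp

-- B's single sorted2 call = A's three segments (zero laxity, active, reverse-sorted rest)
lemma pv_sorted2_split (tbe : List Int) (cc : Int) (e : List (Int × Int))
    (hpw : e.Pairwise (fun p q => p.1 < q.1)) :
    PySem.List.sorted2 e (pvR tbe cc) (pvK2 tbe cc) false =
      e.filter (fun p => decide (pvR tbe cc p = 0)) ++
      e.filter (fun p => decide (pvR tbe cc p = 1)) ++
      PySem.List.sorted (e.filter (fun p => decide (pvR tbe cc p = 2))) (fun p => p.2) true := by
  have h := pv_split tbe cc e [] [] [] hpw (by simp) (by simp) (by simp) (by simp) (by simp)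
  simp only [List.nil_append] at h
  have hs2 : PySem.List.sorted2 e (pvR tbe cc) (pvK2 tbe cc) false =
      e.foldl (fun acc x => PySem.List.insertBy (pvBef tbe cc) x acc) [] := rfl
  rw [hs2, h, PySem.List.sorted_rev_eq_foldl_insertBy]
  rfl

lemma pv_filter_r0 (tbe : List Int) (cc : Int) (e : List (Int × Int)) :
    e.filter (fun p => decide (pvR tbe cc p = 0)) = e.filter (fun p => decide (p.2 = cc)) := by
  apply List.filter_congr
  intro p _
  by_cases h : p.2 = cc
  · simp [pvR, h]
  · by_cases h2 : p.1 ∈ tbe <;> simp [pvR, h, h2]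

lemma pv_filter_r1 (tbe : List Int) (cc : Int) (e : List (Int × Int)) :
    e.filter (fun p => decide (pvR tbe cc p = 1)) =
      (e.filter (fun p => decide (¬ p.2 = cc))).filter (fun p => decide (p.1 ∈ tbe)) := by
  rw [List.filter_filter]
  apply List.filter_congr
  intro p _
  by_cases h : p.2 = cc
  · simp [pvR, h]
  · by_cases h2 : p.1 ∈ tbe <;> simp [pvR, h, h2]

lemma pv_filter_r2 (tbe : List Int) (cc : Int) (e : List (Int × Int)) :
    e.filter (fun p => decide (pvR tbe cc p = 2)) =
      (e.filter (fun p => decide (¬ p.2 = cc))).filter (fun p => decide (¬ p.1 ∈ tbe)) := by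
  rw [List.filter_filter]
  apply List.filter_congr
  intro p _
  by_cases h : p.2 = cc
  · simp [pvR, h]
  · by_cases h2 : p.1 ∈ tbe <;> simp [pvR, h, h2]

-- the port's key functions (with the set) are pvR / pvK2 (with the list)
lemma pv_port_key1 (tbe : List Int) (cc : Int) :
    (fun p : Int × Int => if p.2 = cc then (0:Int) else if p.1 ∈ PySem.Set.ofList tbe then 1 else 2) =
      pvR tbe cc := by
  funext p
  by_cases h : p.2 = cc
  · simp [pvR, h]
  · by_cases h2 : p.1 ∈ tbe <;> simp [pvR, h, h2, PySem.Set.mem_ofList]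

lemma pv_port_key2 (tbe : List Int) (cc : Int) :
    (fun p : Int × Int => if p.2 = cc then p.1 else if p.1 ∈ PySem.Set.ofList tbe then p.1 else -p.2) =
      pvK2 tbe cc := by
  funext p
  by_cases h : p.2 = cc
  · simp [pvK2, h]
  · by_cases h2 : p.1 ∈ tbe <;> simp [pvK2, h, h2, PySem.Set.mem_ofList]

-- For elements of the middle list, membership of the index in A's active list is
-- membership in tasks_being_executed.
lemma pv_low_cond (tbe : List Int) (M : List (Int × Int)) :
    M.filter (fun p => decide (¬ p.1 ∈ (M.filter (fun q => decide (q.1 ∈ tbe))).map (fun q => q.1))) =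
    M.filter (fun p => decide (¬ p.1 ∈ tbe)) := by
  apply List.filter_congr
  intro p hp
  have : (p.1 ∈ (M.filter (fun q => decide (q.1 ∈ tbe))).map (fun q => q.1)) ↔ p.1 ∈ tbe := by
    constructor
    · intro h
      rcases List.mem_map.mp h with ⟨q, hq, hq1⟩
      rcases List.mem_filter.mp hq with ⟨_, hq2⟩
      simpa [hq1] using of_decide_eq_true hq2
    · intro h
      exact List.mem_map.mpr ⟨p, List.mem_filter.mpr ⟨hp, decide_eq_true h⟩, rfl⟩
  simp [this]

lemma pv_take_min {α : Type} (xs : List α) (n : Nat) : xs.take (min n xs.length) = xs.take n := by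
  rcases le_total n xs.length with h | h
  · simp [Nat.min_eq_left h]
  · simp [Nat.min_eq_right h, List.take_of_length_le h, List.take_of_length_le (le_refl xs.length)]

-- A's staged assembly (three segments + nlargest fill + sentinel-pad-and-truncate) equals
-- B's take-m of the single sorted list, padded by the missing count.
lemma pv_assemble (F0 F1 S : List (Int × Int)) (m : Nat) :
    ((F0.map (fun p : Int × Int => p.1) ++ F1.map (fun p : Int × Int => p.1) ++
        ((if (F0.map (fun p : Int × Int => p.1)).length + (F1.map (fun p : Int × Int => p.1)).length < m then
            S.take (m - ((F0.map (fun p : Int × Int => p.1)).length + (F1.map (fun p : Int × Int => p.1)).length))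
          else []).map (fun p : Int × Int => p.1)) ++
        List.replicate m (-1)).take m)
    = (((F0 ++ F1 ++ S).take m).map (fun p : Int × Int => p.1)) ++
        List.replicate (m - (((F0 ++ F1 ++ S).take m).map (fun p : Int × Int => p.1)).length) (-1) := by
  simp only [List.length_map]
  by_cases hc : F0.length + F1.length < m
  · rw [if_pos hc]
    have h1 : (F0 ++ F1 ++ S).take m = F0 ++ F1 ++ S.take (m - (F0.length + F1.length)) := by
      rw [List.take_append, List.take_append,
        List.take_of_length_le (by omega : F0.length ≤ m),
        List.take_of_length_le (by omega : F1.length ≤ m - F0.length)]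
      simp
    rw [h1]
    have hX : F0.map (fun p : Int × Int => p.1) ++ F1.map (fun p : Int × Int => p.1) ++
        (S.take (m - (F0.length + F1.length))).map (fun p : Int × Int => p.1)
        = (F0 ++ F1 ++ S.take (m - (F0.length + F1.length))).map (fun p : Int × Int => p.1) := by
      simp
    rw [List.take_append, hX, List.take_of_length_le
        (by simp only [List.length_map, List.length_append, List.length_take]; omega),
      List.take_replicate, Nat.min_eq_left (Nat.sub_le m _)]
    simp
  · rw [if_neg hc]
    have h1 : (F0 ++ F1 ++ S).take m = (F0 ++ F1).take m := by
      rw [List.take_append (l₁ := F0 ++ F1),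
        show m - (F0 ++ F1).length = 0 by simp; omega, List.take_zero, List.append_nil]
    rw [h1]
    have hlen : ((F0 ++ F1).take m).length = m := by
      simp only [List.length_take, List.length_append]; omega
    rw [hlen, Nat.sub_self, List.replicate_zero, List.append_nil, List.map_nil,
      List.append_nil]
    simp [List.take_append, List.take_replicate, List.map_take,
      show m - F0.length - F1.length = 0 from by omega]

-- ----- affinity pass -----

lemma pv_foldA_absorb (i : Nat) (actual : Int) :
    ∀ (js : List Nat) (t : List Int), i < t.length → t.getD i 0 = actual →
      (∀ j ∈ js, j < t.length) → js.foldl (pvSwapStepA i actual) t = t := by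
  intro js
  induction js with
  | nil => intro t _ _ _; rfl
  | cons j rest ih =>
      intro t hi hact hjs
      have hj : j < t.length := hjs j (List.mem_cons_self ..)
      rw [List.foldl_cons]
      have hstep : pvSwapStepA i actual t j = t := by
        unfold pvSwapStepA
        split_ifs with h
        · have e1 : t.getD i 0 = t[j] := by
            rw [hact, ← h.1, List.getD_eq_getElem t 0 hj]
          have e2 : t.getD j 0 = t[i] := by
            rw [h.1, ← hact, List.getD_eq_getElem t 0 hi]
          rw [e1, e2, List.set_getElem_self hj, List.set_getElem_self hi]
        · rfl
      rw [hstep]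
      exact ih t hi hact (fun x hx => hjs x (List.mem_cons_of_mem _ hx))

def pvCond (i : Nat) (actual : Int) (t : List Int) (j : Nat) : Bool :=
  decide (t.getD j 0 = actual ∧ j ≠ i)

-- A's inner scan = swap with the first matching core (if any)
lemma pv_scan_eq_find (i : Nat) (actual : Int) :
    ∀ (js : List Nat) (t : List Int), i < t.length → (∀ j ∈ js, j < t.length) →
      js.foldl (pvSwapStepA i actual) t =
        match js.find? (pvCond i actual t) with
        | none => t
        | some j => (t.set i (t.getD j 0)).set j (t.getD i 0) := by
  intro js
  induction js with
  | nil => intro t _ _; rfl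
  | cons j rest ih =>
      intro t hi hjs
      have hj : j < t.length := hjs j (List.mem_cons_self ..)
      rw [List.foldl_cons]
      by_cases h : t.getD j 0 = actual ∧ j ≠ i
      · have hfind : (j :: rest).find? (pvCond i actual t) = some j :=
          List.find?_cons_of_pos (by simp only [pvCond, decide_eq_true_eq]; exact h)
        simp only [hfind]
        have hswap : pvSwapStepA i actual t j = (t.set i (t.getD j 0)).set j (t.getD i 0) := by
          unfold pvSwapStepA
          rw [if_pos h]
          exact List.set_comm _ _ h.2
        rw [hswap]
        apply pv_foldA_absorb i actual rest
        · simpa using hi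
        · rw [List.getD_eq_getElem _ 0 (by simpa using hi),
            List.getElem_set_ne h.2 (by simpa using hi),
            List.getElem_set_self (by simpa using hi)]
          exact h.1
        · intro x hx
          simpa using hjs x (List.mem_cons_of_mem _ hx)
      · have hfind : (j :: rest).find? (pvCond i actual t) = rest.find? (pvCond i actual t) :=
          List.find?_cons_of_neg (by simp [pvCond]; tauto)
        simp only [hfind]
        have hid : pvSwapStepA i actual t j = t := by unfold pvSwapStepA; rw [if_neg h]
        rw [hid]
        exact ih t hi (fun x hx => hjs x (List.mem_cons_of_mem _ hx))

lemma pv_find_range_none (p : Nat → Bool) :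
    ∀ m : Nat, (∀ k, k < m → p k = false) → (List.range m).find? p = none := by
  intro m
  induction m with
  | zero => intro _; rfl
  | succ n ih =>
      intro h
      rw [List.range_succ, List.find?_append, ih (fun k hk => h k (by omega))]
      simp [h n (by omega)]

lemma pv_find_range_some (p : Nat → Bool) (j : Nat) :
    ∀ m : Nat, j < m → p j = true → (∀ k, k < j → p k = false) →
      (List.range m).find? p = some j := by
  intro m
  induction m with
  | zero => intro h; omega
  | succ n ih =>
      intro hj hp hmin
      rw [List.range_succ, List.find?_append]
      by_cases h : j < n
      · rw [ih h hp hmin]; rfl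
      · have hjn : j = n := by omega
        subst hjn
        rw [pv_find_range_none p j hmin]
        simp [hp]

lemma pv_affB_eq (i : Nat) (actual : Int) (t : List Int) (hi : i < t.length) :
    (List.range t.length).foldl (pvSwapStepA i actual) t = pvAffB i actual t := by
  rw [pv_scan_eq_find i actual (List.range t.length) t hi (fun j hj => List.mem_range.mp hj)]
  unfold pvAffB
  cases hidx : PySem.List.index? t actual with
  | none =>
      have hnot : actual ∉ t := (PySem.List.index?_eq_none_iff _ _).mp hidx
      have hfind : (List.range t.length).find? (pvCond i actual t) = none := by
        apply pv_find_range_none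
        intro k hk
        simp only [pvCond, decide_eq_false_iff_not, not_and]
        intro hEq _
        exact hnot (hEq ▸ (List.getD_eq_getElem t 0 hk ▸ List.getElem_mem hk))
      rw [hfind]
  | some j0 =>
      obtain ⟨hj0, hval, hmin⟩ := PySem.List.getElem_of_index?_eq_some hidx
      by_cases hji : j0 = i
      · subst hji
        cases hidx2 : PySem.List.index? (t.drop (j0+1)) actual with
        | none =>
            have hnot : actual ∉ t.drop (j0+1) := (PySem.List.index?_eq_none_iff _ _).mp hidx2
            have hfind : (List.range t.length).find? (pvCond j0 actual t) = none := by
              apply pv_find_range_none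
              intro k hk
              simp only [pvCond, decide_eq_false_iff_not, not_and]
              intro hEq hne
              rw [List.getD_eq_getElem t 0 hk] at hEq
              rcases Nat.lt_trichotomy k j0 with hlt | heq | hgt
              · exact hmin k hlt hEq
              · exact hne heq
              · apply hnot
                have hk' : k - (j0+1) < (t.drop (j0+1)).length := by
                  rw [List.length_drop]; omega
                have hdk : (t.drop (j0+1))[k - (j0+1)] = t[k] := by
                  rw [List.getElem_drop]
                  congr 1
                  omega
                exact hEq ▸ hdk ▸ List.getElem_mem hk'
            rw [hfind]
            simp
        | some d =>
            obtain ⟨hd, hdval, hdmin⟩ := PySem.List.getElem_of_index?_eq_some hidx2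
            have hdlen : (t.drop (j0+1)).length = t.length - (j0+1) := List.length_drop ..
            have hfind : (List.range t.length).find? (pvCond j0 actual t) = some (d + (j0+1)) := by
              apply pv_find_range_some
              · omega
              · unfold pvCond
                rw [List.getD_eq_getElem t 0 (by omega : d + (j0+1) < t.length)]
                have hv : t[d + (j0+1)]'(by omega) = actual := by
                  rw [← hdval, List.getElem_drop]
                  congr 1
                  omega
                simp [hv]
                omega
              · intro k hk
                simp only [pvCond, decide_eq_false_iff_not, not_and]
                intro hEq hne
                rw [List.getD_eq_getElem t 0 (by omega : k < t.length)] at hEq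
                rcases Nat.lt_trichotomy k j0 with hlt | heq | hgt
                · exact hmin k hlt hEq
                · exact hne heq
                · have hk' : k - (j0+1) < d := by omega
                  apply hdmin (k - (j0+1)) hk'
                  rw [List.getElem_drop]
                  have : j0 + 1 + (k - (j0 + 1)) = k := by omega
                  simp only [this]
                  exact hEq
            rw [hfind]
            simp
      · have hfind : (List.range t.length).find? (pvCond i actual t) = some j0 := by
          apply pv_find_range_some _ _ _ hj0
          · unfold pvCond
            rw [List.getD_eq_getElem t 0 hj0]
            simp [hval, hji]
          · intro k hk
            simp only [pvCond, decide_eq_false_iff_not, not_and]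
            intro hEq _
            exact hmin k hk (by rwa [List.getD_eq_getElem t 0 (by omega : k < t.length)] at hEq)
        rw [hfind]
        simp [hji]

lemma pv_length_affB (i : Nat) (actual : Int) (t : List Int) :
    (pvAffB i actual t).length = t.length := by
  unfold pvAffB
  split
  · rfl
  · split
    · rfl
    · simp

-- the two outer affinity loops agree on any state of the right length
lemma pv_outer (tbe : List Int) (m : Nat) :
    ∀ (is_ : List Nat) (t : List Int), t.length = m → (∀ i ∈ is_, i < m) →
      is_.foldl (fun t i => (List.range m).foldl (pvSwapStepA i (tbe.getD i 0)) t) t =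
      is_.foldl (fun t i => pvAffB i (tbe.getD i 0) t) t := by
  intro is_
  induction is_ with
  | nil => intro t _ _; rfl
  | cons i rest ih =>
      intro t ht his
      have hi : i < m := his i (List.mem_cons_self ..)
      rw [List.foldl_cons, List.foldl_cons]
      have h1 : (List.range m).foldl (pvSwapStepA i (tbe.getD i 0)) t =
          pvAffB i (tbe.getD i 0) t := by
        rw [← ht] at hi ⊢
        exact pv_affB_eq i (tbe.getD i 0) t hi
      rw [h1]
      exact ih _ (by rw [pv_length_affB, ht]) (fun x hx => his x (List.mem_cons_of_mem _ hx))

-- zipIdx as a map over range, to align B's outer enumerate loop with A's index loop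
lemma pv_zipIdx_eq (l : List Int) :
    l.zipIdx = (List.range l.length).map (fun i => (l.getD i 0, i)) := by
  apply List.ext_getElem
  · simp
  · intro i h1 h2
    simp only [List.length_zipIdx] at h1
    simp [List.getElem_zipIdx, List.getElem?_eq_getElem h1]

-- the whole pipeline
lemma pv_main (tbe icc : List Int) (cc : Int) :
    schedule_policy_imp_py tbe icc cc = schedule_policy_imp_py_alt tbe icc cc := by
  have hpw : ((PySem.List.enumerate icc 0).filter (fun p => decide (0 < p.2))).Pairwise
      (fun p q : Int × Int => p.1 < q.1) :=
    List.Pairwise.filter _ (PySem.List.pairwise_lt_enumerate icc 0)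
  simp only [schedule_policy_imp_py, schedule_policy_imp_py_alt]
  rw [pv_port_key1, pv_port_key2,
    pv_sorted2_split tbe cc _ hpw, pv_filter_r0, pv_filter_r1, pv_filter_r2, pv_low_cond,
    ← PySem.List.length_sorted
      ((((PySem.List.enumerate icc 0).filter (fun p => decide (0 < p.2))).filter
          (fun p => decide (¬ p.2 = cc))).filter (fun p => decide (¬ p.1 ∈ tbe)))
      (fun p => p.2) true,
    pv_take_min, pv_assemble, pv_zipIdx_eq tbe, List.foldl_map]
  exact pv_outer tbe tbe.length (List.range tbe.length) _
    (by simp only [List.length_append, List.length_map, List.length_take, List.length_replicate]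
        omega)
    (fun i hi => List.mem_range.mp hi)

-- ===== VERDICT =====
theorem schedule_policy_imp_py_spec : Claim_equal_schedule_policy_imp_py := by
  intro tbe icc cc _
  unfold Spec_schedule_policy_imp_py
  exact pv_main tbe icc cc
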